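-- pv_equiv track=rewrite | github.com/tpsdevlop/surgebackend | Exskilence/techviews.py | calculate_questions_completed
-- ===== SOURCE A (Python) =====
-- def calculate_questions_completed(data,subject):
--     subjects = ['HTMLCSS', 'JavaScript', 'SQL', 'Python']  # Define your subjects
--     results = {}
--     assigned_html_css = data.get('Qns_lists', {}).get('HTMLCSS', [])
--     answered_html = data.get('Ans_lists', {}).get('HTML', [])
--     answered_css = data.get('Ans_lists', {}).get('CSS', [])
--     answered_html_css = set(answered_html + answered_css)
--     completed_html_css = [q for q in assigned_html_css if q in answered_html_css]
--     results['HTMLCSS'] = {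
--         'total_assigned': len(assigned_html_css),
--         'total_answered': len(completed_html_css)
--     }
--     for subject in ['JavaScript', 'SQL', 'Python']:
--         assigned_questions = data.get('Qns_lists', {}).get(subject, [])
--         answered_questions = data.get('Ans_lists', {}).get(subject, [])
--         completed_questions = [q for q in assigned_questions if q in answered_questions]
--
--         results[subject] = {
--             'total_assigned': len(assigned_questions),
--             'total_answered': len(completed_questions)
--         }
--
--     return results
-- ===== SOURCE B (Python) =====
-- def calculate_questions_completed(data, subject):
--     sources = [('HTMLCSS', ['HTML', 'CSS']),
--                ('JavaScript', ['JavaScript']),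
--                ('SQL', ['SQL']),
--                ('Python', ['Python'])]
--     qns = data.get('Qns_lists', {})
--     ans = data.get('Ans_lists', {})
--     results = {}
--     for subj, keys in sources:
--         assigned = qns.get(subj, [])
--         counts = {}
--         for q in assigned:
--             counts[q] = counts.get(q, 0) + 1
--         answered = set()
--         for k in keys:
--             answered.update(ans.get(k, []))
--         results[subj] = {
--             'total_assigned': len(assigned),
--             'total_answered': sum(counts.get(q, 0) for q in answered),
--         }
--     return results
-- ===== Notes on version B (the rewrite author's own statement) =====
-- stated objective: alternative
-- what changed: B inverts the counting direction: instead of A's filter of the assigned list by membership in the answered collection per subject, B builds a dict of occurrence counts of the assigned questions once and sums those counts over the distinct answered questions, driven by one table-driven loop over the four subjects instead of A's unrolled HTMLCSS block plus three-subject loop.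
import Mathlib
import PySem

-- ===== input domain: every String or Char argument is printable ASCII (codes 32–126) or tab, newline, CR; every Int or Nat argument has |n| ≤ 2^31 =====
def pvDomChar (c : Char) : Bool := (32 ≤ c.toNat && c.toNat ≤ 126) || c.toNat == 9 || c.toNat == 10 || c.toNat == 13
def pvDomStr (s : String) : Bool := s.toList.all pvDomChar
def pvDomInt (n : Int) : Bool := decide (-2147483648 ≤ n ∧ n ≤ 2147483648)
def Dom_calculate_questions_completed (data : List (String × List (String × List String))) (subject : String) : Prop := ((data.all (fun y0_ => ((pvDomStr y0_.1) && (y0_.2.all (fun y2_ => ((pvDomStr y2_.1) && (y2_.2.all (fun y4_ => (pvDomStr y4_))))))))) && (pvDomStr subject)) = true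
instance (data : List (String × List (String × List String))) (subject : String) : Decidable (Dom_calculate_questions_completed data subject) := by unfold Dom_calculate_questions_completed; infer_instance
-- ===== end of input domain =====

-- B inverts A's per-subject counting: instead of filtering the assigned list by membership in the
-- answered collection, it builds a count table of the assigned questions once and sums the counts
-- of the distinct answered questions, in one table-driven pass over the four subjects (objective: alternative).

-- ===== PORT A =====
def calculate_questions_completed (data : List (String × List (String × List String))) (subject : String) : List (String × List (String × Int)) :=
  let results : PySem.Dict String (List (String × Int)) := PySem.Dict.empty
  let assigned_html_css := (PySem.Dict.mk ((PySem.Dict.mk data).getD "Qns_lists" [])).getD "HTMLCSS" []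
  let answered_html := (PySem.Dict.mk ((PySem.Dict.mk data).getD "Ans_lists" [])).getD "HTML" []
  let answered_css := (PySem.Dict.mk ((PySem.Dict.mk data).getD "Ans_lists" [])).getD "CSS" []
  let answered_html_css := PySem.Set.ofList (answered_html ++ answered_css)
  let completed_html_css := assigned_html_css.filter (fun q => PySem.Set.contains answered_html_css q)
  let results := results.insert "HTMLCSS"
    [("total_assigned", (assigned_html_css.length : Int)), ("total_answered", (completed_html_css.length : Int))]
  let results := ["JavaScript", "SQL", "Python"].foldl (fun results subject =>
    let assigned_questions := (PySem.Dict.mk ((PySem.Dict.mk data).getD "Qns_lists" [])).getD subject []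
    let answered_questions := (PySem.Dict.mk ((PySem.Dict.mk data).getD "Ans_lists" [])).getD subject []
    let completed_questions := assigned_questions.filter (fun q => answered_questions.contains q)
    results.insert subject
      [("total_assigned", (assigned_questions.length : Int)), ("total_answered", (completed_questions.length : Int))]) results
  results.items

-- ===== PORT B =====
def calculate_questions_completed_alt (data : List (String × List (String × List String))) (subject : String) : List (String × List (String × Int)) :=
  let sources : List (String × List String) :=
    [("HTMLCSS", ["HTML", "CSS"]), ("JavaScript", ["JavaScript"]), ("SQL", ["SQL"]), ("Python", ["Python"])]
  let qns := (PySem.Dict.mk data).getD "Qns_lists" []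
  let ans := (PySem.Dict.mk data).getD "Ans_lists" []
  let results := sources.foldl (fun results p =>
    let assigned := (PySem.Dict.mk qns).getD p.1 []
    let counts := assigned.foldl (fun d q => d.insert q (d.getD q 0 + 1)) (PySem.Dict.empty : PySem.Dict String Int)
    let answered := p.2.foldl (fun s k => PySem.Set.update s ((PySem.Dict.mk ans).getD k [])) (PySem.Set.empty : PySem.Set String)
    -- sum over a Python set: order-independent, ported as a fold over the Set's element list
    results.insert p.1
      [("total_assigned", (assigned.length : Int)),
       ("total_answered", answered.foldl (fun n q => n + counts.getD q 0) (0 : Int))])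
    (PySem.Dict.empty : PySem.Dict String (List (String × Int)))
  results.items

-- ===== PRECONDITION & SPEC =====
def Spec_calculate_questions_completed (data : List (String × List (String × List String))) (subject : String) (out : List (String × List (String × Int))) : Prop := out = calculate_questions_completed_alt data subject
instance (data : List (String × List (String × List String))) (subject : String) (out : List (String × List (String × Int))) : Decidable (Spec_calculate_questions_completed data subject out) := by unfold Spec_calculate_questions_completed; infer_instance

-- ===== CLAIM (what is proved, stated in full; the proofs are below) =====
def Claim_equal_calculate_questions_completed : Prop := ∀ (data : List (String × List (String × List String))) (subject : String), Dom_calculate_questions_completed data subject → Spec_calculate_questions_completed data subject (calculate_questions_completed data subject)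

-- ===== LEMMAS AND PROOFS =====

-- splitting off one fresh value from a membership filter counts its occurrences
theorem pv_filter_cons (z : String) (zs : List String) (hz : z ∉ zs) : ∀ (xs : List String),
    (xs.filter (fun q => decide (q = z) || decide (q ∈ zs))).length
      = xs.count z + (xs.filter (fun q => decide (q ∈ zs))).length := by
  intro xs
  induction xs with
  | nil => simp
  | cons x xs ih =>
    by_cases h : x = z
    · subst h
      simp [List.filter, hz, ih]; omega
    · by_cases hc : x ∈ zs <;> simp [List.filter, h, hc, ih] <;> omega

-- summing assigned-occurrence counts over a duplicate-free answered list
-- equals the length of A's membership filter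
theorem pv_foldl_sum (zs : List String) (hz : zs.Nodup) : ∀ (xs : List String) (n : Int),
    zs.foldl (fun n q => n + (xs.count q : Int)) n
      = n + ((xs.filter (fun q => decide (q ∈ zs))).length : Int) := by
  induction zs with
  | nil => intro xs n; simp
  | cons z zs ih =>
    intro xs n
    simp only [List.foldl, List.mem_cons, Bool.decide_or]
    rw [ih (List.nodup_cons.mp hz).2, pv_filter_cons z zs (List.nodup_cons.mp hz).1]
    push_cast
    ring

-- B's sum over the answered set, with the count table rewritten to List.count,
-- equals the length of A's membership filter on the original answered list
theorem pv_sum_eq_filter (ys xs : List String) :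
    (PySem.Set.ofList ys).foldl (fun n q => n + (xs.count q : Int)) (0 : Int)
      = ((xs.filter (fun q => decide (q ∈ ys))).length : Int) := by
  rw [pv_foldl_sum (PySem.Set.ofList ys) (PySem.Set.nodup_ofList ys) xs 0, zero_add]
  congr 2
  exact List.filter_congr (fun q _ => by simp [PySem.Set.mem_ofList])

-- ===== VERDICT (by name: the statement is the Claim_ definition above) =====
theorem calculate_questions_completed_spec : Claim_equal_calculate_questions_completed := by
  intro data subject _
  unfold Spec_calculate_questions_completed
  unfold calculate_questions_completed calculate_questions_completed_alt
  simp only [List.foldl, PySem.Set.update_empty, ← PySem.Set.ofList_append,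
    PySem.Dict.getD_foldl_insert_add_one, PySem.Dict.getD_empty, zero_add,
    pv_sum_eq_filter, PySem.Set.contains_eq_listContains, List.contains_eq_mem]
  simp [PySem.Set.mem_ofList]
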